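-- pv_equiv track=rewrite | github.com/peleiden/daluke | daluke/pretrain/data/__init__.py | calculate_spans
-- ===== SOURCE A (Python) =====
-- def calculate_spans(tokens: list[str]) -> list[tuple[int, int]]:
--     """ Calculate word spans from a list of tokens. Excludes punctuation """
--     spans = list()
--     i = 0
--     while i < len(tokens):
--         start = i
--         if tokens[i].isalnum():
--             start = i
--             i += 1
--             while i < len(tokens) and tokens[i].startswith("##"):
--                 i += 1
--             spans.append((start, i))
--         else:
--             i += 1
--
--     return spans
-- ===== SOURCE B (Python) =====
-- def calculate_spans(tokens: list[str]) -> list[tuple[int, int]]: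
--     """ Calculate word spans from a list of tokens. Excludes punctuation """
--     spans = []
--     for i, tok in enumerate(tokens):
--         if tok.isalnum():
--             spans.append((i, i + 1))
--         elif tok.startswith("##") and spans and spans[-1][1] == i:
--             spans[-1] = (spans[-1][0], i + 1)
--     return spans
-- ===== Notes on version B (the rewrite author's own statement) =====
-- stated objective: simpler
-- what changed: Replaces the outer while with a nested index-jumping continuation while by a single flat enumerate loop that appends a unit span on an alnum token and extends the last span in place when a '##' continuation token directly follows it.
import Mathlib
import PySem

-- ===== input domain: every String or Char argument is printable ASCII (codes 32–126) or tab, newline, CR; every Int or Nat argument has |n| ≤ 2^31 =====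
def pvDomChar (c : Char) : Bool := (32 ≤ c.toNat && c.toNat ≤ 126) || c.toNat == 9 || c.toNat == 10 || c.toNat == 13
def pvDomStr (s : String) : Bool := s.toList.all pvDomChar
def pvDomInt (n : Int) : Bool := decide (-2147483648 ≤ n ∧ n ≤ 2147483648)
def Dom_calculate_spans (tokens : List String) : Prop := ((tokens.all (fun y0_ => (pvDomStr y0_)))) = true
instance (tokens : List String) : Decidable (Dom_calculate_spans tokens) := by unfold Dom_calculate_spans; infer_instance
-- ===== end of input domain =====

-- B replaces A's outer while with nested continuation while by one flat enumerate loop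
-- that appends a unit span and extends the last span on an adjacent '##' token (simpler).

-- ===== PORT A =====
-- inner `while i < len(tokens) and tokens[i].startswith("##"): i += 1`
def pvSkipA (tokens : List String) (i : Nat) : Nat :=
  if h : i < tokens.length then
    if PySem.Str.startswith tokens[i] "##" then pvSkipA tokens (i + 1) else i
  else i
termination_by tokens.length - i

lemma pvSkipA_ge (tokens : List String) (i : Nat) : i ≤ pvSkipA tokens i := by
  unfold pvSkipA
  split
  · split
    · have := pvSkipA_ge tokens (i + 1); omega
    · exact le_refl _
  · exact le_refl _
termination_by tokens.length - i

-- outer `while i < len(tokens): …`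
def pvLoopA (tokens : List String) (i : Nat) (spans : List (Int × Int)) : List (Int × Int) :=
  if h : i < tokens.length then
    if PySem.Str.strIsalnum tokens[i] then
      pvLoopA tokens (pvSkipA tokens (i + 1))
        (spans ++ [((i : Int), ((pvSkipA tokens (i + 1) : Nat) : Int))])
    else
      pvLoopA tokens (i + 1) spans
  else spans
termination_by tokens.length - i
decreasing_by
  · have := pvSkipA_ge tokens (i + 1); omega
  · omega

def calculate_spans (tokens : List String) : List (Int × Int) :=
  pvLoopA tokens 0 []

-- ===== PORT B =====
def pvStepB (spans : List (Int × Int)) (p : Int × String) : List (Int × Int) :=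
  if PySem.Str.strIsalnum p.2 then
    spans ++ [(p.1, p.1 + 1)]
  else
    match spans.getLast? with
    | some (s, e) =>
        if PySem.Str.startswith p.2 "##" && (e == p.1) then
          spans.dropLast ++ [(s, p.1 + 1)]
        else spans
    | none => spans

def calculate_spans_alt (tokens : List String) : List (Int × Int) :=
  (PySem.List.enumerate tokens).foldl pvStepB []

-- ===== PRECONDITION & SPEC =====
def Spec_calculate_spans (tokens : List String) (out : List (Int × Int)) : Prop := out = calculate_spans_alt tokens
instance (tokens : List String) (out : List (Int × Int)) : Decidable (Spec_calculate_spans tokens out) := by unfold Spec_calculate_spans; infer_instance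

-- ===== CLAIM (what is proved, stated in full; the proofs are below) =====
def Claim_equal_calculate_spans : Prop := ∀ (tokens : List String), Dom_calculate_spans tokens → Spec_calculate_spans tokens (calculate_spans tokens)

-- ===== LEMMAS AND PROOFS =====

lemma not_alnum_of_hashes (s : String) (h : PySem.Str.startswith s "##" = true) :
    PySem.Str.strIsalnum s = false := by
  simp only [PySem.Str.startswith_eq, PySem.Str.strIsalnum_eq] at *
  rw [PySem.Chars.startswith_iff] at h
  obtain ⟨t, ht⟩ := h
  have hs : s.toList = '#' :: '#' :: t := by simpa using ht.symm
  rw [hs]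
  simp [PySem.Chars.strIsalnum, PySem.Chars.isalnum]
  intro h'
  exact absurd h' (by decide)

-- loop invariant: the last recorded span ends at or before i, and strictly before i
-- whenever tokens[i] is a '##' continuation token
def pvInv (tokens : List String) (i : Nat) (spans : List (Int × Int)) : Prop :=
  ∀ s e, spans.getLast? = some (s, e) →
    e ≤ (i : Int) ∧ (PySem.Str.startswith (tokens.getD i "") "##" = true → e < (i : Int))

lemma pvSkipA_stop (tokens : List String) (i : Nat) :
    PySem.Str.startswith (tokens.getD (pvSkipA tokens i) "") "##" = false := by
  rw [pvSkipA]
  split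
  · rename_i h
    split
    · exact pvSkipA_stop tokens (i + 1)
    · rename_i hsw
      simpa [List.getD, List.getElem?_eq_getElem h] using hsw
  · rename_i h
    have : tokens.getD i "" = "" := by
      simp [List.getD, List.getElem?_eq_none (by omega : tokens.length ≤ i)]
    rw [this]
    decide
termination_by tokens.length - i

lemma runB (tokens : List String) (i : Nat) (spans : List (Int × Int)) (st : Int) :
    (PySem.List.enumerate (tokens.drop i) i).foldl pvStepB (spans ++ [(st, (i : Int))]) =
    (PySem.List.enumerate (tokens.drop (pvSkipA tokens i)) (pvSkipA tokens i)).foldl pvStepB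
      (spans ++ [(st, ((pvSkipA tokens i : Nat) : Int))]) := by
  rw [pvSkipA]
  split
  · rename_i h
    split
    · rename_i hsw
      rw [List.drop_eq_getElem_cons h, PySem.List.enumerate_cons, List.foldl_cons]
      have hna := not_alnum_of_hashes _ hsw
      have hstep : pvStepB (spans ++ [(st, (i : Int))]) ((i : Int), tokens[i]) =
          spans ++ [(st, ((i + 1 : Nat) : Int))] := by
        simp only [pvStepB, hna, Bool.false_eq_true, if_false, List.getLast?_concat,
          hsw, beq_self_eq_true, Bool.and_self, if_true, List.dropLast_concat]
        push_cast
        rfl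
      rw [hstep]
      have := runB tokens (i + 1) spans st
      push_cast at this ⊢
      exact this
    · rfl
  · rfl
termination_by tokens.length - i

lemma mainA (tokens : List String) (i : Nat) (spans : List (Int × Int))
    (hinv : pvInv tokens i spans) :
    pvLoopA tokens i spans = (PySem.List.enumerate (tokens.drop i) i).foldl pvStepB spans := by
  rw [pvLoopA]
  split
  · rename_i h
    rw [List.drop_eq_getElem_cons h, PySem.List.enumerate_cons, List.foldl_cons]
    split
    · rename_i ha
      -- alnum token: B appends a unit span, then the continuation run extends it to pvSkipA
      have hstep : pvStepB spans ((i : Int), tokens[i]) =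
          spans ++ [((i : Int), ((i + 1 : Nat) : Int))] := by
        simp only [pvStepB, ha, if_true]
        push_cast
        rfl
      rw [hstep]
      have hrun := runB tokens (i + 1) spans ((i : Int))
      have hge := pvSkipA_ge tokens (i + 1)
      have hih := mainA tokens (pvSkipA tokens (i + 1))
        (spans ++ [((i : Int), ((pvSkipA tokens (i + 1) : Nat) : Int))]) ?_
      · rw [hih]
        push_cast at hrun ⊢
        exact hrun.symm
      · intro s e hl
        simp at hl
        obtain ⟨hs, he⟩ := hl
        refine ⟨by omega, fun hsw => ?_⟩
        rw [pvSkipA_stop tokens (i + 1)] at hsw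
        exact absurd hsw (by simp)
    · rename_i ha
      -- non-alnum token: B leaves spans unchanged (invariant: no adjacent open span)
      have hstep : pvStepB spans ((i : Int), tokens[i]) = spans := by
        unfold pvStepB
        simp only []
        rw [if_neg (by simpa using ha)]
        cases hsp : spans.getLast? with
        | none => rfl
        | some p =>
          obtain ⟨s, e⟩ := p
          have hi := hinv s e hsp
          rw [List.getD_eq_getElem?_getD, List.getElem?_eq_getElem h] at hi
          simp only []
          split
          · rename_i hc
            simp only [Bool.and_eq_true, beq_iff_eq] at hc
            have := hi.2 hc.1
            omega
          · rfl
      rw [hstep]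
      refine mainA tokens (i + 1) spans ?_
      intro s e hl
      have := (hinv s e hl).1
      constructor
      · push_cast; omega
      · intro _; push_cast; omega
  · rename_i h
    rw [List.drop_of_length_le (by omega)]
    simp [PySem.List.enumerate]
termination_by tokens.length - i
decreasing_by
  · have := pvSkipA_ge tokens (i + 1); omega
  · omega

-- ===== VERDICT (by name: the statement is the Claim_ definition above) =====
theorem calculate_spans_spec : Claim_equal_calculate_spans := by
  intro tokens _
  unfold Spec_calculate_spans calculate_spans calculate_spans_alt
  have := mainA tokens 0 [] (by intro s e h; simp at h)
  simpa using this
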